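-- pv_equiv track=rewrite | github.com/RacerJay/nddu | nddu.py | _normalize_intf_name
-- ===== SOURCE A (Python) =====
-- from typing import Optional, Dict, List, Set, Tuple, Union, Any, NoReturn
--
-- _INTF_ABBREV: List[tuple] = [
--     ('tengigabitethernet',   'TenGigabitEthernet'),
--     ('hundredgige',          'HundredGigE'),
--     ('fortygigabitethernet', 'FortyGigabitEthernet'),
--     ('gigabitethernet',      'GigabitEthernet'),
--     ('fastethernet',         'FastEthernet'),
--     ('ethernet',             'Ethernet'),
--     ('loopback',             'Loopback'),
--     ('port-channel',         'Port-channel'),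
--     ('tunnel',               'Tunnel'),
--     ('vlan',                 'Vlan'),
--     ('mgmt',                 'mgmt'),
--     # Abbreviated forms — after full-name entries so full names match first
--     ('tengig',               'TenGigabitEthernet'),
--     ('hundgig',              'HundredGigE'),
--     ('fortygig',             'FortyGigabitEthernet'),
--     ('eth',                  'Ethernet'),
--     ('gi',                   'GigabitEthernet'),
--     ('fa',                   'FastEthernet'),
--     ('te',                   'TenGigabitEthernet'),
--     ('hu',                   'HundredGigE'),
--     ('fo',                   'FortyGigabitEthernet'),
--     ('lo',                   'Loopback'),
--     ('po',                   'Port-channel'),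
--     ('tu',                   'Tunnel'),
--     ('vl',                   'Vlan'),
-- ]
--
-- def _normalize_intf_name(name: str) -> str:
--     """Expand abbreviated or mixed-case Cisco interface names to canonical full form.
--
--     Case-insensitive: 'loopback0', 'Lo0', 'Loopback0' all → 'Loopback0'.
--     'Eth1/11' → 'Ethernet1/11', 'Lo0' → 'Loopback0', 'Po2' → 'Port-channel2', etc.
--     """
--     name_lower = name.lower()
--     for abbrev, full in _INTF_ABBREV:
--         if name_lower.startswith(abbrev):
--             rest = name_lower[len(abbrev):]
--             # Only treat as abbreviation/full-name if the remainder is a digit, '/', or end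
--             if not rest or rest[0].isdigit() or rest[0] == '/':
--                 return full + rest
--     return name
-- ===== SOURCE B (Python) =====
-- _INTF_ABBREV = [
--     ('tengigabitethernet',   'TenGigabitEthernet'),
--     ('hundredgige',          'HundredGigE'),
--     ('fortygigabitethernet', 'FortyGigabitEthernet'),
--     ('gigabitethernet',      'GigabitEthernet'),
--     ('fastethernet',         'FastEthernet'),
--     ('ethernet',             'Ethernet'),
--     ('loopback',             'Loopback'),
--     ('port-channel',         'Port-channel'),
--     ('tunnel',               'Tunnel'),
--     ('vlan',                 'Vlan'),
--     ('mgmt',                 'mgmt'),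
--     ('tengig',               'TenGigabitEthernet'),
--     ('hundgig',              'HundredGigE'),
--     ('fortygig',             'FortyGigabitEthernet'),
--     ('eth',                  'Ethernet'),
--     ('gi',                   'GigabitEthernet'),
--     ('fa',                   'FastEthernet'),
--     ('te',                   'TenGigabitEthernet'),
--     ('hu',                   'HundredGigE'),
--     ('fo',                   'FortyGigabitEthernet'),
--     ('lo',                   'Loopback'),
--     ('po',                   'Port-channel'),
--     ('tu',                   'Tunnel'),
--     ('vl',                   'Vlan'),
-- ]
--
-- _INTF_MAP = dict(_INTF_ABBREV)
--
-- def _normalize_intf_name(name: str) -> str: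
--     """Expand abbreviated Cisco interface names via a single dict lookup on the
--     alphabetic head (everything before the first digit or '/')."""
--     nl = name.lower()
--     i = 0
--     while i < len(nl) and not (nl[i].isdigit() or nl[i] == '/'):
--         i += 1
--     full = _INTF_MAP.get(nl[:i])
--     return name if full is None else full + nl[i:]
-- ===== Notes on version B (the rewrite author's own statement) =====
-- stated objective: idiomatic
-- what changed: Instead of scanning the 25-entry abbreviation table with startswith on each entry, B splits the lowered name at the first digit or slash character and does a single dict lookup of that head, appending the lowered remainder on a hit.
import Mathlib
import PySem

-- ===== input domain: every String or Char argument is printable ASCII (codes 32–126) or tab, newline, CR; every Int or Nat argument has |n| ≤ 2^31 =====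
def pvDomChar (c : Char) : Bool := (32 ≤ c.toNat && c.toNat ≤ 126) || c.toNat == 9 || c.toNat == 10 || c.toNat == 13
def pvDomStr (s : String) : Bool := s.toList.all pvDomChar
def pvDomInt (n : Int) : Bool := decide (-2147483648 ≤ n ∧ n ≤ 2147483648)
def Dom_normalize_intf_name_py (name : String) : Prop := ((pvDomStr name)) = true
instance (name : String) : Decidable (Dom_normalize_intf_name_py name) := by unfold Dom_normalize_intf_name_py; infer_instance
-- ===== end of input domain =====

-- B replaces A's linear scan of the 25-entry table by a single dict lookup on the alphabetic head (idiomatic; same asymptotic cost).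

-- the module constant _INTF_ABBREV (shared by both sources)
def pvTable : List (List Char × List Char) := [
  ("tengigabitethernet".toList,   "TenGigabitEthernet".toList),
  ("hundredgige".toList,          "HundredGigE".toList),
  ("fortygigabitethernet".toList, "FortyGigabitEthernet".toList),
  ("gigabitethernet".toList,      "GigabitEthernet".toList),
  ("fastethernet".toList,         "FastEthernet".toList),
  ("ethernet".toList,             "Ethernet".toList),
  ("loopback".toList,             "Loopback".toList),
  ("port-channel".toList,         "Port-channel".toList),
  ("tunnel".toList,               "Tunnel".toList),
  ("vlan".toList,                 "Vlan".toList),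
  ("mgmt".toList,                 "mgmt".toList),
  ("tengig".toList,               "TenGigabitEthernet".toList),
  ("hundgig".toList,              "HundredGigE".toList),
  ("fortygig".toList,             "FortyGigabitEthernet".toList),
  ("eth".toList,                  "Ethernet".toList),
  ("gi".toList,                   "GigabitEthernet".toList),
  ("fa".toList,                   "FastEthernet".toList),
  ("te".toList,                   "TenGigabitEthernet".toList),
  ("hu".toList,                   "HundredGigE".toList),
  ("fo".toList,                   "FortyGigabitEthernet".toList),
  ("lo".toList,                   "Loopback".toList),
  ("po".toList,                   "Port-channel".toList),
  ("tu".toList,                   "Tunnel".toList),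
  ("vl".toList,                   "Vlan".toList)]

-- ===== PORT A =====
-- A's for-loop over the table: first entry whose abbrev prefixes name_lower with a
-- digit-'/'-or-end remainder wins; falling off the loop returns the original name.
def pvAloop (nl : List Char) : List (List Char × List Char) → Option (List Char)
  | [] => none
  | (ab, fu) :: t =>
    if PySem.Chars.startswith nl ab then
      -- rest = name_lower[len(abbrev):]
      match PySem.List.slice nl (some (ab.length : Int)) none with
      | [] => some (fu ++ PySem.List.slice nl (some (ab.length : Int)) none)
      | c :: _ =>
        if PySem.Chars.isdigit c || c == '/' then
          some (fu ++ PySem.List.slice nl (some (ab.length : Int)) none)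
        else pvAloop nl t
    else pvAloop nl t

def normalize_intf_name_py (name : String) : String :=
  let nl := PySem.Chars.lower name.toList
  match pvAloop nl pvTable with
  | some out => String.ofList out
  | none => name

-- ===== PORT B =====
-- _INTF_MAP = dict(_INTF_ABBREV)
def pvMap : PySem.Dict (List Char) (List Char) := PySem.Dict.ofList pvTable

def pvBnd (c : Char) : Bool := PySem.Chars.isdigit c || c == '/'

-- the while-loop of Source B: split name_lower at the first digit or '/'
def pvSpan : List Char → List Char × List Char
  | [] => ([], [])
  | c :: t => if pvBnd c then ([], c :: t) else
      let p := pvSpan t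
      (c :: p.1, p.2)

def normalize_intf_name_py_alt (name : String) : String :=
  let nl := PySem.Chars.lower name.toList
  let p := pvSpan nl
  match PySem.Dict.get? pvMap p.1 with
  | some full => String.ofList (full ++ p.2)
  | none => name

-- ===== PRECONDITION & SPEC =====
def Spec_normalize_intf_name_py (name : String) (out : String) : Prop := out = normalize_intf_name_py_alt name
instance (name : String) (out : String) : Decidable (Spec_normalize_intf_name_py name out) := by unfold Spec_normalize_intf_name_py; infer_instance

-- ===== CLAIM (what is proved, stated in full; the proofs are below) =====
def Claim_equal_normalize_intf_name_py : Prop := ∀ (name : String), Dom_normalize_intf_name_py name → Spec_normalize_intf_name_py name (normalize_intf_name_py name)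

-- ===== LEMMAS AND PROOFS =====

theorem pvSpan_eq (l : List Char) :
    pvSpan l = (l.takeWhile (fun c => !pvBnd c), l.dropWhile (fun c => !pvBnd c)) := by
  induction l with
  | nil => rfl
  | cons c t ih =>
    simp only [pvSpan, List.takeWhile, List.dropWhile, ih]
    cases h : pvBnd c <;> simp

-- boundary check of A: remainder empty, a digit, or '/'
def pvBcheck : List Char → Prop
  | [] => True
  | c :: _ => pvBnd c = true

theorem pvKey (ab nl : List Char) (hab : ∀ c ∈ ab, pvBnd c = false) :
    (ab <+: nl ∧ pvBcheck (nl.drop ab.length)) ↔ nl.takeWhile (fun c => !pvBnd c) = ab := by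
  constructor
  · rintro ⟨⟨r, hr⟩, hb⟩
    subst hr
    rw [List.takeWhile_append_of_pos (by simpa using hab)]
    have h2 : (ab ++ r).drop ab.length = r := by
      simp
    rw [h2] at hb
    cases r with
    | nil => simp
    | cons c t =>
      simp only [pvBcheck] at hb
      simp [List.takeWhile, hb]
  · intro h
    constructor
    · exact h ▸ List.takeWhile_prefix _
    · have hsplit := List.takeWhile_append_dropWhile (p := fun c => !pvBnd c) (l := nl)
      have hlen : nl.drop ab.length = nl.dropWhile (fun c => !pvBnd c) := by
        conv_lhs => rw [← hsplit]
        rw [← h, List.drop_append_of_le_length (le_refl _), List.drop_length, List.nil_append]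
      rw [hlen]
      cases hd : nl.dropWhile (fun c => !pvBnd c) with
      | nil => trivial
      | cons c t =>
        simp only [pvBcheck]
        have := List.head_dropWhile_not (p := fun c => !pvBnd c) (l := nl) (by simp [hd])
        simp only [hd, List.head_cons, Bool.not_eq_eq_eq_not] at this
        exact this

theorem pvAloop_eq (nl : List Char) (t : List (List Char × List Char))
    (hk : ∀ pr ∈ t, ∀ c ∈ pr.1, pvBnd c = false) :
    pvAloop nl t =
      ((PySem.Dict.mk t).get? (nl.takeWhile (fun c => !pvBnd c))).map
        (fun fu => fu ++ nl.dropWhile (fun c => !pvBnd c)) := by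
  induction t with
  | nil => simp [pvAloop, PySem.Dict.get?]
  | cons pr t ih =>
    obtain ⟨ab, fu⟩ := pr
    have hab : ∀ c ∈ ab, pvBnd c = false := hk (ab, fu) (List.mem_cons_self)
    have ih' := ih (fun pr h => hk pr (List.mem_cons_of_mem _ h))
    rw [PySem.Dict.get?_mk_cons]
    by_cases h : nl.takeWhile (fun c => !pvBnd c) = ab
    · -- this entry fires in A, and the dict head matches
      have hcond := (pvKey ab nl hab).mpr h
      obtain ⟨hpre, hb⟩ := hcond
      have hsw : PySem.Chars.startswith nl ab = true := (PySem.Chars.startswith_iff _ _).mpr hpre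
      have hrest : PySem.List.slice nl (some (ab.length : Int)) none = nl.drop ab.length :=
        PySem.List.slice_from_natCast ..
      have hdw : nl.drop ab.length = nl.dropWhile (fun c => !pvBnd c) := by
        have hsplit := List.takeWhile_append_dropWhile (p := fun c => !pvBnd c) (l := nl)
        conv_lhs => rw [← hsplit]
        rw [← h, List.drop_append_of_le_length (le_refl _), List.drop_length, List.nil_append]
      have hbeq : (ab == nl.takeWhile (fun c => !pvBnd c)) = true := by simp [h]
      rw [hbeq]
      simp only [pvAloop, hsw, if_pos, hrest, hdw]
      cases hc : nl.dropWhile (fun c => !pvBnd c) with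
      | nil => simp
      | cons c cs =>
        rw [hdw, hc] at hb
        simp only [pvBcheck] at hb
        simp only [pvBnd] at hb
        simp [hb]
    · -- this entry does not fire in A, and the dict head does not match
      have hbeq : (ab == nl.takeWhile (fun c => !pvBnd c)) = false := by
        simp; exact fun hh => h hh.symm
      rw [hbeq]
      have hnot := (pvKey ab nl hab).not.mpr h
      simp only [pvAloop]
      by_cases hsw : PySem.Chars.startswith nl ab = true
      · have hpre : ab <+: nl := (PySem.Chars.startswith_iff _ _).mp hsw
        have hnb : ¬ pvBcheck (nl.drop ab.length) := fun hb => hnot ⟨hpre, hb⟩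
        have hrest : PySem.List.slice nl (some (ab.length : Int)) none = nl.drop ab.length :=
          PySem.List.slice_from_natCast ..
        rw [hsw, if_pos rfl] at *
        simp only [hrest]
        cases hc : nl.drop ab.length with
        | nil => exact absurd (by rw [hc]; trivial) hnb
        | cons c cs =>
          have hcf : pvBnd c = false := by
            rw [hc] at hnb
            simpa [pvBcheck] using hnb
          simp only [pvBnd] at hcf
          simp [hcf, ih']
      · simp only [Bool.not_eq_true] at hsw
        simp [hsw, ih']

theorem pvMap_eq : pvMap = PySem.Dict.mk pvTable := by decide

-- ===== VERDICT (by name: the statement is the Claim_ definition above) =====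
set_option maxRecDepth 4096 in
theorem normalize_intf_name_py_spec : Claim_equal_normalize_intf_name_py := by
  intro name _
  unfold Spec_normalize_intf_name_py normalize_intf_name_py normalize_intf_name_py_alt
  have hk0 : pvTable.all (fun pr => pr.1.all (fun c => !pvBnd c)) = true := by decide
  have h := pvAloop_eq (PySem.Chars.lower name.toList) pvTable
    (by simpa [List.all_eq_true] using hk0)
  simp only [pvSpan_eq, pvMap_eq, h]
  cases PySem.Dict.get? (PySem.Dict.mk pvTable)
      ((PySem.Chars.lower name.toList).takeWhile (fun c => !pvBnd c)) <;> simp
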